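-- pv_equiv track=rewrite | github.com/mauboro/my_katas | set_reducer/main.py | set_reducer
-- ===== SOURCE A (Python) =====
-- def set_reducer(inp):
--     if len(inp) == 1:
--         return inp[0]
--
--     number = inp[0]
--     streak = 0
--     res = []
--
--     for n in inp:
--         if n == number:
--             streak += 1
--         else:
--             res.append(streak)
--             number = n
--             streak = 1
--
--     res.append(streak)
--
--     return set_reducer(res)
-- ===== SOURCE B (Python) =====
-- def set_reducer(inp):
--     # Iterative: repeatedly replace the list by its run lengths (two-pointer scan)
--     # until one element is left.  Empty input reaches inp[0] and raises IndexError,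
--     # exactly as the original.
--     while len(inp) > 1:
--         res = []
--         i = 0
--         while i < len(inp):
--             j = i
--             while j < len(inp) and inp[j] == inp[i]:
--                 j += 1
--             res.append(j - i)
--             i = j
--         inp = res
--     return inp[0]
-- ===== Notes on version B (the rewrite author's own statement) =====
-- stated objective: alternative
-- what changed: Replaces the recursion-with-streak-accumulator by an explicit while loop that rebuilds the list from run lengths found by a two-pointer index scan (i/j run boundaries) until one element remains.
import Mathlib
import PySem

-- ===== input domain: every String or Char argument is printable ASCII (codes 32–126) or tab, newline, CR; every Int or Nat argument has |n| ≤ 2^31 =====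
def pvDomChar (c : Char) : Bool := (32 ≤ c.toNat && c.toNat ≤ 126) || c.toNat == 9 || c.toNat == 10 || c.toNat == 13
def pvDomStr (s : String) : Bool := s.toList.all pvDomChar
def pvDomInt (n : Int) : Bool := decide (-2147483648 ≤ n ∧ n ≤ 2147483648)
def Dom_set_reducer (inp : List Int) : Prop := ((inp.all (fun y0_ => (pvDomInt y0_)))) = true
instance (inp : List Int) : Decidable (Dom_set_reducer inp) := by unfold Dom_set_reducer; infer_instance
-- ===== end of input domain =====

-- B replaces A's recursion-with-streak-accumulator by an explicit while loop with a
-- two-pointer run scan; same values on every nonempty list (objective: alternative).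


-- ===== PORT A =====

-- A's for-loop over `inp` with state (number, streak, res), fused with the final
-- `res.append(streak)` that follows the loop in A.
def aLoop (number streak : Int) (res : List Int) : List Int → List Int
  | [] => res ++ [streak]
  | n :: rest =>
    if n == number then aLoop number (streak + 1) res rest
    else aLoop n 1 (res ++ [streak]) rest

-- termination fuel shared by both ports: an upper bound on the number of reduction
-- rounds (each round strictly decreases this measure; proved in main_dec below)
def mu (l : List Int) : Nat :=
  if l.isEmpty then 4 else 2 * l.length + (if l.all (· == 1) then 0 else 1)

-- A's recursion, with fuel (never exhausted: mu decreases every round)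
def aGo : Nat → List Int → Int
  | 0, _ => 0
  | fuel + 1, inp =>
    if inp.length == 1 then (PySem.List.pyGet? inp 0).getD 0
    else aGo fuel (aLoop ((PySem.List.pyGet? inp 0).getD 0) 0 [] inp)

def set_reducer (inp : List Int) : Int := aGo (mu inp) inp

-- ===== PORT B =====

-- B's innermost while loop: advance j over the run of value v (fuel = list length,
-- an upper bound on the remaining steps)
def bRun : Nat → List Int → Int → Nat → Nat
  | 0, _, _, j => j
  | fuel + 1, inp, v, j =>
    if j < inp.length && (inp.getD j 0 == v) then bRun fuel inp v (j + 1) else j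

-- B's middle while loop: scan runs from index i, appending their lengths to res
def bScan : Nat → List Int → Nat → List Int → List Int
  | 0, _, _, res => res
  | fuel + 1, inp, i, res =>
    if i < inp.length then
      bScan fuel inp (bRun inp.length inp (inp.getD i 0) i)
        (res ++ [((bRun inp.length inp (inp.getD i 0) i : Int) - (i : Int))])
    else res

-- B's outer while loop, with the same fuel bound as A's recursion
def bGo : Nat → List Int → Int
  | 0, _ => 0
  | fuel + 1, inp =>
    if 1 < inp.length then bGo fuel (bScan inp.length inp 0 [])
    else (PySem.List.pyGet? inp 0).getD 0

def set_reducer_alt (inp : List Int) : Int := bGo (mu inp) inp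

-- ===== PRECONDITION & SPEC =====
-- Pre_ excludes exactly the empty list, on which the Python A raises IndexError
-- (inp[0]); B raises IndexError there too.
def Pre_set_reducer (inp : List Int) : Prop := inp ≠ []
instance (inp : List Int) : Decidable (Pre_set_reducer inp) := by unfold Pre_set_reducer; infer_instance
def pvWitness_set_reducer : List Int := [1, 1, 2]

def Spec_set_reducer (inp : List Int) (out : Int) : Prop := out = set_reducer_alt inp
instance (inp : List Int) (out : Int) : Decidable (Spec_set_reducer inp out) := by unfold Spec_set_reducer; infer_instance

-- ===== CLAIM (what is proved, stated in full; the proofs are below) =====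
def Claim_equal_set_reducer : Prop := ∀ (inp : List Int), Dom_set_reducer inp → Pre_set_reducer inp → Spec_set_reducer inp (set_reducer inp)

-- ===== LEMMAS AND PROOFS =====

-- run lengths of l with a pending run (number, streak): reference form of A's loop
def runsP (number streak : Int) : List Int → List Int
  | [] => [streak]
  | n :: rest =>
    if n == number then runsP number (streak + 1) rest
    else streak :: runsP n 1 rest

-- run lengths of a list (the value one pass of either program produces)
def R : List Int → List Int
  | [] => []
  | a :: t => runsP a 1 t

theorem aLoop_spec (l : List Int) : ∀ (number streak : Int) (res : List Int),
    aLoop number streak res l = res ++ runsP number streak l := by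
  induction l with
  | nil => intro number streak res; simp [aLoop, runsP]
  | cons n rest ih =>
    intro number streak res
    by_cases h : n == number
    · simp [aLoop, runsP, h, ih]
    · simp [aLoop, runsP, h, ih]

theorem runsP_len (l : List Int) : ∀ (number streak : Int),
    (runsP number streak l).length ≤ 1 + l.length := by
  induction l with
  | nil => intro number streak; simp [runsP]
  | cons n rest ih =>
    intro number streak
    by_cases h : n == number
    · simp only [runsP, h, if_pos, List.length_cons]
      have := ih number (streak + 1); omega
    · simp only [runsP, h, if_neg, Bool.false_eq_true, not_false_iff, List.length_cons]
      have := ih n 1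
      omega

theorem runsP_take (l : List Int) : ∀ (v streak : Int),
    runsP v streak l =
      (streak + ((l.takeWhile (· == v)).length : Int)) :: R (l.dropWhile (· == v)) := by
  induction l with
  | nil => intro v streak; simp [runsP, R]
  | cons n rest ih =>
    intro v streak
    by_cases h : n == v
    · simp only [runsP, h, if_pos, List.takeWhile_cons, List.dropWhile_cons]
      rw [ih v (streak + 1)]
      simp [h]; ring_nf
    · simp only [runsP, h, if_neg, Bool.false_eq_true, not_false_iff]
      simp [List.takeWhile_cons, List.dropWhile_cons, h, R]

theorem runsP_all_one (l : List Int) : ∀ (v : Int),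
    (runsP v 1 l).length = 1 + l.length → runsP v 1 l = List.replicate (1 + l.length) 1 := by
  induction l with
  | nil => intro v _; simp [runsP, List.replicate]
  | cons n rest ih =>
    intro v hlen
    by_cases h : n == v
    · exfalso
      simp only [runsP, h, if_pos] at hlen
      have := runsP_len rest v 2
      simp at hlen; omega
    · simp only [runsP, h, if_neg, Bool.false_eq_true, not_false_iff] at hlen ⊢
      simp only [List.length_cons] at hlen
      have : (runsP n 1 rest).length = 1 + rest.length := by omega
      rw [ih n this]
      have hlen2 : 1 + (n :: rest).length = (1 + rest.length) + 1 := by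
        simp only [List.length_cons]; omega
      rw [hlen2, List.replicate_succ]

theorem R_ne_nil (l : List Int) (h : l ≠ []) : R l ≠ [] := by
  cases l with
  | nil => exact absurd rfl h
  | cons a t =>
    simp only [R]
    rw [runsP_take]
    simp

theorem R_len (l : List Int) : (R l).length ≤ l.length := by
  cases l with
  | nil => simp [R]
  | cons a t =>
    simp only [R, List.length_cons]
    have := runsP_len t a 1; omega

theorem mu_pos4 (l : List Int) (h : l ≠ []) : mu l = 2 * l.length + (if l.all (· == 1) then 0 else 1) := by
  simp [mu, List.isEmpty_iff, h]

theorem replicate_all_one (n : Nat) : (List.replicate n (1 : Int)).all (· == 1) = true := by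
  simp [List.all_eq_true]

theorem main_dec (l : List Int) (h2 : 2 ≤ l.length) : mu (R l) < mu l := by
  have hne : l ≠ [] := by intro h; subst h; simp at h2
  have hRne : R l ≠ [] := R_ne_nil l hne
  have hRlen : (R l).length ≤ l.length := R_len l
  have h1 : 1 ≤ (R l).length := by
    cases hR : R l with
    | nil => exact absurd hR hRne
    | cons a t => simp
  rw [mu_pos4 l hne, mu_pos4 (R l) hRne]
  by_cases hall : l.all (· == 1)
  · -- l is all ones: R l = [l.length], small
    obtain ⟨a, t, rfl⟩ : ∃ a t, l = a :: t := by
      cases l with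
      | nil => exact absurd rfl hne
      | cons a t => exact ⟨a, t, rfl⟩
    simp only [R]
    simp only [runsP_take]
    have ha : a == 1 := by simp [List.all_eq_true] at hall; simp [hall.1]
    have ht : t.takeWhile (· == a) = t := by
      rw [List.takeWhile_eq_self_iff]
      intro x hx
      simp [List.all_eq_true] at hall
      have := hall.2 x hx
      simp at ha ⊢; omega
    have ht' : t.dropWhile (· == a) = [] := by
      rw [List.dropWhile_eq_nil_iff]
      intro x hx
      simp [List.all_eq_true] at hall
      have := hall.2 x hx
      simp at ha ⊢; omega
    rw [ht, ht']
    simp only [R, List.length_cons, List.length_nil]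
    simp only [hall, if_pos]
    split <;> simp_all <;> omega
  · -- l not all ones: mu l = 2n+1
    simp only [hall, if_neg, Bool.false_eq_true, not_false_iff]
    by_cases hr : (R l).length = l.length
    · -- all runs singletons: R l = replicate n 1
      obtain ⟨a, t, rfl⟩ : ∃ a t, l = a :: t := by
        cases l with
        | nil => exact absurd rfl hne
        | cons a t => exact ⟨a, t, rfl⟩
      simp only [R, List.length_cons] at hr ⊢
      have hrep := runsP_all_one t a (by omega)
      simp only [hrep, replicate_all_one, if_pos, List.length_replicate]
      omega
    · have : (R l).length < l.length := by omega
      split <;> omega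

-- pyGet? on index 0 of a cons
theorem pyGet0_cons (a : Int) (t : List Int) :
    ((PySem.List.pyGet? (a :: t) 0).getD 0) = a := by
  simp [PySem.List.pyGet?, PySem.List.pyIdx?]

theorem takeWhile_len_le (l : List Int) (v : Int) :
    (l.takeWhile (· == v)).length ≤ l.length := by
  induction l with
  | nil => simp
  | cons a t ih =>
    by_cases h : a == v
    · rw [List.takeWhile_cons_of_pos (p := (· == v)) h]; simpa using ih
    · rw [List.takeWhile_cons_of_neg (p := (· == v)) (by simpa using h)]; simp

theorem bRun_spec (inp : List Int) (v : Int) : ∀ (fuel j : Nat), j ≤ inp.length →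
    inp.length - j ≤ fuel →
    bRun fuel inp v j = j + ((inp.drop j).takeWhile (· == v)).length ∧
    inp.drop (bRun fuel inp v j) = (inp.drop j).dropWhile (· == v) := by
  intro fuel
  induction fuel with
  | zero =>
    intro j hj hf
    have hj' : j = inp.length := by omega
    have hdrop : inp.drop j = [] := by rw [hj']; simp
    simp [bRun, hdrop]
  | succ fuel ih =>
    intro j hj hf
    by_cases hlt : j < inp.length
    · have hdrop : inp.drop j = inp[j] :: inp.drop (j + 1) := List.drop_eq_getElem_cons hlt
      have hgetD : inp.getD j 0 = inp[j] := by simp [List.getD, hlt]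
      by_cases hv : inp[j] == v
      · have hcond : (j < inp.length && (inp.getD j 0 == v)) = true := by
          simp [hlt, hgetD, hv]
        rw [bRun, hcond]
        simp only [if_pos]
        have hih := ih (j + 1) (by omega) (by omega)
        rw [hdrop]
        simp only [List.takeWhile_cons, hv, if_pos, List.dropWhile_cons, List.length_cons]
        constructor
        · rw [hih.1]; omega
        · exact hih.2
      · have hcond : (j < inp.length && (inp.getD j 0 == v)) = false := by
          simp only [List.getD, Bool.and_eq_false_iff, decide_eq_false_iff_not, beq_eq_false_iff_ne,
            ne_eq]
          right
          rw [List.getElem?_eq_getElem hlt]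
          simpa using hv
        rw [bRun, hcond]
        simp only [Bool.false_eq_true, if_neg, not_false_iff]
        constructor
        · rw [hdrop, List.takeWhile_cons_of_neg (by simpa using hv)]
          simp
        · conv_rhs => rw [hdrop]
          rw [List.dropWhile_cons_of_neg (by simpa using hv)]
          exact hdrop
    · have hj' : j = inp.length := by omega
      have hdrop : inp.drop j = [] := by rw [hj']; simp
      have hcond : (j < inp.length && (inp.getD j 0 == v)) = false := by simp; omega
      rw [bRun, hcond]
      simp [hdrop]

theorem bScan_spec (inp : List Int) : ∀ (fuel i : Nat), i ≤ inp.length →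
    inp.length - i ≤ fuel → ∀ (res : List Int),
    bScan fuel inp i res = res ++ R (inp.drop i) := by
  intro fuel
  induction fuel with
  | zero =>
    intro i hi hf res
    have hi' : i = inp.length := by omega
    have hdrop : inp.drop i = [] := by rw [hi']; simp
    simp [bScan, hdrop, R]
  | succ fuel ih =>
    intro i hi hf res
    by_cases hlt : i < inp.length
    · have hdrop : inp.drop i = inp[i] :: inp.drop (i + 1) := List.drop_eq_getElem_cons hlt
      have hgetD : inp.getD i 0 = inp[i] := by simp [List.getD, hlt]
      have hspec := bRun_spec inp (inp[i]) inp.length i (by omega) (by omega)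
      have htake : (inp.drop i).takeWhile (· == inp[i])
          = inp[i] :: ((inp.drop (i+1)).takeWhile (· == inp[i])) := by
        rw [hdrop, List.takeWhile_cons_of_pos (p := (· == inp[i])) (by simp)]
      have hjval : bRun inp.length inp (inp[i]) i
          = i + 1 + ((inp.drop (i+1)).takeWhile (· == inp[i])).length := by
        rw [hspec.1, htake]; simp only [List.length_cons]; omega
      have hjle : bRun inp.length inp (inp[i]) i ≤ inp.length := by
        have h1 := takeWhile_len_le (inp.drop (i+1)) (inp[i])
        have h2 : (inp.drop (i+1)).length = inp.length - (i+1) := by simp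
        omega
      have hRdrop : R (inp.drop i)
          = ((bRun inp.length inp (inp[i]) i : Int) - (i : Int))
            :: R (inp.drop (bRun inp.length inp (inp[i]) i)) := by
        rw [hdrop]
        simp only [R]
        rw [runsP_take]
        have h1 : (inp.drop (i+1)).dropWhile (· == inp[i])
            = inp.drop (bRun inp.length inp (inp[i]) i) := by
          have h2 := hspec.2
          rw [hdrop] at h2
          simp only [List.dropWhile_cons, beq_self_eq_true, if_pos] at h2
          exact h2.symm
        rw [h1]
        congr 1
        rw [hjval]; push_cast; ring
      rw [bScan]
      simp only [hlt, if_pos]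
      rw [hgetD]
      rw [ih (bRun inp.length inp (inp[i]) i) hjle (by omega)]
      rw [hRdrop]
      simp
    · have hi' : i = inp.length := by omega
      have hdrop : inp.drop i = [] := by rw [hi']; simp
      rw [bScan]
      simp [hlt, hdrop, R]

theorem mu_pos (l : List Int) : 1 ≤ mu l := by
  by_cases h : l = []
  · subst h; simp [mu]
  · rw [mu_pos4 l h]
    have : l.length ≠ 0 := by simpa using h
    split <;> omega

theorem go_eq : ∀ (fuel : Nat) (inp : List Int), mu inp ≤ fuel →
    aGo fuel inp = bGo fuel inp := by
  intro fuel
  induction fuel with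
  | zero =>
    intro inp h
    have := mu_pos inp
    omega
  | succ fuel ih =>
    intro inp hf
    by_cases h1 : inp.length = 1
    · rw [aGo, bGo]
      simp [h1]
    · cases inp with
      | nil =>
        have hf' : 4 ≤ fuel + 1 := by simpa [mu] using hf
        obtain ⟨fuel', rfl⟩ : ∃ f, fuel = f + 1 := ⟨fuel - 1, by omega⟩
        rw [aGo, bGo]
        simp only [List.length_nil]
        rw [if_neg (by simp), if_neg (by omega)]
        simp [aLoop, aGo, PySem.List.pyGet?, PySem.List.pyIdx?]
      | cons a t =>
        have h2 : 2 ≤ (a :: t).length := by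
          simp only [List.length_cons] at h1 ⊢; omega
        have hmu : mu (R (a :: t)) ≤ fuel := by
          have := main_dec (a :: t) h2
          omega
        rw [aGo, bGo]
        rw [if_neg (by simpa using h1), if_pos (by omega)]
        have hA : aLoop ((PySem.List.pyGet? (a :: t) 0).getD 0) 0 [] (a :: t) = R (a :: t) := by
          rw [pyGet0_cons, aLoop_spec]
          have h0 : runsP a 0 (a :: t) = runsP a 1 t := by simp [runsP]
          simp only [List.nil_append, h0]
          rfl
        have hB : bScan (a :: t).length (a :: t) 0 [] = R (a :: t) := by
          rw [bScan_spec (a :: t) (a :: t).length 0 (by omega) (by omega) []]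
          simp
        rw [hA, hB]
        exact ih (R (a :: t)) hmu

-- ===== VERDICT (by name: the statement is the Claim_ definition above) =====
theorem set_reducer_spec : Claim_equal_set_reducer := by
  intro inp _ _
  exact go_eq (mu inp) inp (le_refl _)
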